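-- pv_equiv track=rewrite | github.com/psrpsj/Algorithm | week03/빛의 경로 사이클/sangryu.py | solution
-- ===== SOURCE A (Python) =====
-- def get_next(row, col, node_dir, grid):
--     if node_dir == 0:
--         if grid[row][col] == "S":
--             n_row, n_col, n_dir = row - 1, col, node_dir
--             if n_row < 0:
--                 n_row = len(grid) - 1
--         elif grid[row][col] == "L":
--             n_row, n_col, n_dir = row, col - 1, 2
--             if n_col < 0:
--                 n_col = len(grid[0]) - 1
--         elif grid[row][col] == "R":
--             n_row, n_col, n_dir = row, col + 1, 3
--             if n_col == len(grid[0]):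
--                 n_col = 0
--     elif node_dir == 1:
--         if grid[row][col] == "S":
--             n_row, n_col, n_dir = row + 1, col, node_dir
--             if n_row == len(grid):
--                 n_row = 0
--         elif grid[row][col] == "L":
--             n_row, n_col, n_dir = row, col + 1, 3
--             if n_col == len(grid[0]):
--                 n_col = 0
--         elif grid[row][col] == "R":
--             n_row, n_col, n_dir = row, col - 1, 2
--             if n_col < 0:
--                 n_col = len(grid[0]) - 1
--     elif node_dir == 2:
--         if grid[row][col] == "S":
--             n_row, n_col, n_dir = row, col - 1, node_dir
--             if n_col < 0:
--                 n_col = len(grid[0]) - 1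
--         elif grid[row][col] == "L":
--             n_row, n_col, n_dir = row + 1, col, 1
--             if n_row == len(grid):
--                 n_row = 0
--         elif grid[row][col] == "R":
--             n_row, n_col, n_dir = row - 1, col, 0
--             if n_row < 0:
--                 n_row = len(grid) - 1
--     elif node_dir == 3:
--         if grid[row][col] == "S":
--             n_row, n_col, n_dir = row, col + 1, node_dir
--             if n_col == len(grid[0]):
--                 n_col = 0
--         elif grid[row][col] == "L":
--             n_row, n_col, n_dir = row - 1, col, 0
--             if n_row < 0:
--                 n_row = len(grid) - 1
--         elif grid[row][col] == "R":
--             n_row, n_col, n_dir = row + 1, col, 1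
--             if n_row == len(grid):
--                 n_row = 0
--     return n_row, n_col, n_dir
--
-- def solution(grid):
--     array = []
--     answer = []
--     for _ in range(len(grid)):
--         array.append([[0, 0, 0, 0] for _ in range(len(grid[0]))])
--
--     for row in range(len(grid)):
--         for col in range(len(grid[0])):
--             for node_dir in range(4):
--                 if array[row][col][node_dir] == 0:
--                     length = 1
--                     array[row][col][node_dir] = 1
--                     n_row, n_col, n_dir = get_next(row, col, node_dir, grid)
--                     while array[n_row][n_col][n_dir] != 1:
--                         array[n_row][n_col][n_dir] = 1
--                         length += 1
--                         n_row, n_col, n_dir = get_next(n_row, n_col, n_dir, grid)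
--                     answer.append(length)
--     return sorted(answer)
-- ===== SOURCE B (Python) =====
-- def solution(grid):
--     # The transition on (cell, direction) states is a bijection (every
--     # reflection step is reversible), so the states split into disjoint
--     # cycles.  Enumerate each cycle exactly once, at its minimal state:
--     # walk from every state until the walk returns to it, and record the
--     # length only when no smaller state was seen on the way.  No visited
--     # structure and no per-step if-ladder (turn table + modular moves).
--     R = len(grid)
--     C = len(grid[0]) if grid else 0
--     DELTA = [(-1, 0), (1, 0), (0, -1), (0, 1)]
--     TURN = {"S": [0, 1, 2, 3], "L": [2, 3, 1, 0], "R": [3, 2, 0, 1]}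
--
--     def step(s):
--         d = s % 4
--         r, c = divmod(s // 4, C)
--         nd = TURN[grid[r][c]][d]
--         dr, dc = DELTA[nd]
--         return (((r + dr) % R) * C + (c + dc) % C) * 4 + nd
--
--     answer = []
--     for s in range(4 * R * C):
--         length, cur, smallest = 1, step(s), True
--         while cur != s:
--             if cur < s:
--                 smallest = False
--             length += 1
--             cur = step(cur)
--         if smallest:
--             answer.append(length)
--     return sorted(answer)
-- ===== Notes on version B (the rewrite author's own statement) =====
-- stated objective: alternative
-- what changed: A marks states in a nested 3-D visited array and walks each light path until it hits a marked state; B exploits that the step relation is a bijection (reflections are reversible), so the states split into disjoint cycles: it enumerates each cycle exactly once at its minimal state by walking until the walk returns to its start, with no visited structure at all, and a turn-table + modular move replaces A's 16-branch if-ladder.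
import Mathlib
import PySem

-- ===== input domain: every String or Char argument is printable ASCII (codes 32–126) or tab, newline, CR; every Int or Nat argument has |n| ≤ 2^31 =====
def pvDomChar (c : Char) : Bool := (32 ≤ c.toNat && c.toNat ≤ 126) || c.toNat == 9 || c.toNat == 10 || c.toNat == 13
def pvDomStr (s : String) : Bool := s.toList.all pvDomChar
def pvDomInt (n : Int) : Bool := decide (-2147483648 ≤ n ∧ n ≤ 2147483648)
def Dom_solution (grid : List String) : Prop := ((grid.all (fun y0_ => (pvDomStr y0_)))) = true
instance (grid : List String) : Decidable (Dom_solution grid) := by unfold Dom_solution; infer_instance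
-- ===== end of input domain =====

-- B exploits that the light step is a bijection on (cell, direction) states, so the
-- states split into disjoint cycles: it walks from every state until the walk returns
-- to its start and records the length only at the cycle's minimal state — no visited
-- structure at all, a turn table + modular move instead of A's 16-branch if-ladder.
-- A mutates only its own local array.

-- ===== PORT A =====
def getNextA (grid : List String) (row col ndir : Int) : Int × Int × Int :=
  -- grid[row][col]; the .getD defaults are unreachable under Pre_solution
  let R : Int := PySem.List.len grid
  let C : Int := PySem.Str.len ((PySem.List.pyGet? grid 0).getD "")
  let ch : Char := (PySem.Str.pyGet? ((PySem.List.pyGet? grid row).getD "") col).getD ' '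
  if ndir = 0 then
    if ch = 'S' then
      let nr := row - 1
      (if nr < 0 then R - 1 else nr, col, ndir)
    else if ch = 'L' then
      let nc := col - 1
      (row, if nc < 0 then C - 1 else nc, 2)
    else if ch = 'R' then
      let nc := col + 1
      (row, if nc = C then 0 else nc, 3)
    else (row, col, ndir)  -- Python raises UnboundLocalError here; excluded by Pre_solution
  else if ndir = 1 then
    if ch = 'S' then
      let nr := row + 1
      (if nr = R then 0 else nr, col, ndir)
    else if ch = 'L' then
      let nc := col + 1
      (row, if nc = C then 0 else nc, 3)
    else if ch = 'R' then
      let nc := col - 1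
      (row, if nc < 0 then C - 1 else nc, 2)
    else (row, col, ndir)
  else if ndir = 2 then
    if ch = 'S' then
      let nc := col - 1
      (row, if nc < 0 then C - 1 else nc, ndir)
    else if ch = 'L' then
      let nr := row + 1
      (if nr = R then 0 else nr, col, 1)
    else if ch = 'R' then
      let nr := row - 1
      (if nr < 0 then R - 1 else nr, col, 0)
    else (row, col, ndir)
  else if ndir = 3 then
    if ch = 'S' then
      let nc := col + 1
      (row, if nc = C then 0 else nc, ndir)
    else if ch = 'L' then
      let nr := row - 1
      (if nr < 0 then R - 1 else nr, col, 0)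
    else if ch = 'R' then
      let nr := row + 1
      (if nr = R then 0 else nr, col, 1)
    else (row, col, ndir)
  else (row, col, ndir)

def aGet (arr : List (List (List Int))) (r c d : Int) : Int :=
  PySem.List.pyGetD (PySem.List.pyGetD (PySem.List.pyGetD arr r []) c []) d (-1)

-- array[r][c][d] = v (functional update of A's in-place mutation)
def aSet (arr : List (List (List Int))) (r c d : Int) (v : Int) : List (List (List Int)) :=
  PySem.List.pySetD arr r
    (PySem.List.pySetD (PySem.List.pyGetD arr r []) c
      (PySem.List.pySetD (PySem.List.pyGetD (PySem.List.pyGetD arr r []) c []) d v))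

-- A's while loop; fuel 4·R·C bounds its iterations (each marks an unmarked state)
def walkA (grid : List String) : Nat → List (List (List Int)) → Int → Int → Int → Int →
    List (List (List Int)) × Int
  | 0, arr, _, _, _, len => (arr, len)
  | f + 1, arr, nr, nc, nd, len =>
    if aGet arr nr nc nd ≠ 1 then
      let arr' := aSet arr nr nc nd 1
      let nx := getNextA grid nr nc nd
      walkA grid f arr' nx.1 nx.2.1 nx.2.2 (len + 1)
    else (arr, len)

def solution (grid : List String) : List Int :=
  let R : Int := PySem.List.len grid
  let C : Int := PySem.Str.len ((PySem.List.pyGet? grid 0).getD "")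
  let arr0 := (PySem.List.pyRange 0 R 1).foldl
    (fun a _ => a ++ [(PySem.List.pyRange 0 C 1).map (fun _ => ([0, 0, 0, 0] : List Int))]) []
  let fuel := (R * C * 4).toNat
  let res := (PySem.List.pyRange 0 R 1).foldl (fun st row =>
    (PySem.List.pyRange 0 C 1).foldl (fun st col =>
      (PySem.List.pyRange 0 4 1).foldl (fun st dir =>
        if aGet st.1 row col dir = 0 then
          let arr1 := aSet st.1 row col dir 1
          let nx := getNextA grid row col dir
          let wl := walkA grid fuel arr1 nx.1 nx.2.1 nx.2.2 1
          (wl.1, st.2 ++ [wl.2])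
        else st) st) st) (arr0, ([] : List Int))
  PySem.List.sorted res.2 id false

-- ===== PORT B =====
def turnB : PySem.Dict Char (List Int) :=
  PySem.Dict.ofList [('S', [0, 1, 2, 3]), ('L', [2, 3, 1, 0]), ('R', [3, 2, 0, 1])]

def deltaB : List (Int × Int) := [(-1, 0), (1, 0), (0, -1), (0, 1)]

-- B's step(s): decode the flat state, turn by the table, move with wraparound
def stepB (grid : List String) (R C : Int) (s : Int) : Int :=
  let d := PySem.Int.mod s 4
  let rc := PySem.Int.floordiv s 4
  let r := PySem.Int.floordiv rc C
  let c := PySem.Int.mod rc C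
  let nd := PySem.List.pyGetD
    (PySem.Dict.getD turnB
      ((PySem.Str.pyGet? ((PySem.List.pyGet? grid r).getD "") c).getD ' ') []) d 0
  let dd := PySem.List.pyGetD deltaB nd (0, 0)
  (PySem.Int.mod (r + dd.1) R * C + PySem.Int.mod (c + dd.2) C) * 4 + nd

-- B's while loop (walk until the path returns to its start s); the step relation is a
-- bijection, so under Pre_solution the walk returns within 4·R·C steps (proved below):
-- fuel 4·R·C bounds the iterations
def walkB (grid : List String) (R C : Int) : Nat → Int → Int → Int → Bool → Int × Bool
  | 0, _, _, len, small => (len, small)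
  | f + 1, s, cur, len, small =>
    if cur ≠ s then
      walkB grid R C f s (stepB grid R C cur) (len + 1) (if cur < s then false else small)
    else (len, small)

def solution_alt (grid : List String) : List Int :=
  let R : Int := PySem.List.len grid
  let C : Int := match grid with | [] => 0 | s :: _ => PySem.Str.len s
  let fuel := (4 * R * C).toNat
  let res := (PySem.List.pyRange 0 (4 * R * C) 1).foldl (fun ans s =>
    let w := walkB grid R C fuel s (stepB grid R C s) 1 true
    if w.2 then ans ++ [w.1] else ans) ([] : List Int)
  PySem.List.sorted res id false

-- ===== PRECONDITION & SPEC =====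
-- Pre_ excludes exactly the inputs where A raises: a row shorter than row 0
-- (IndexError) or a scanned character other than 'S'/'L'/'R' (UnboundLocalError
-- in get_next); every cell (row, col) with col < len(grid[0]) is scanned.
def Pre_solution (grid : List String) : Prop :=
  ∀ s ∈ grid, PySem.Str.len (grid.headD "") ≤ PySem.Str.len s ∧
    ∀ i < (PySem.Str.len (grid.headD "")).toNat,
      PySem.Str.pyGet? s (i : Int) = some 'S' ∨
      PySem.Str.pyGet? s (i : Int) = some 'L' ∨
      PySem.Str.pyGet? s (i : Int) = some 'R'
instance (grid : List String) : Decidable (Pre_solution grid) := by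
  unfold Pre_solution; infer_instance

def pvWitness_solution : List String := (["SR", "LS"])

def Spec_solution (grid : List String) (out : List Int) : Prop := out = solution_alt grid
instance (grid : List String) (out : List Int) : Decidable (Spec_solution grid out) := by
  unfold Spec_solution; infer_instance

-- ===== CLAIM (what is proved, stated in full; the proofs are below) =====
def Claim_equal_solution : Prop :=
  ∀ (grid : List String), Dom_solution grid → Pre_solution grid →
    Spec_solution grid (solution grid)

-- ===== LEMMAS AND PROOFS =====

-- proof-side intermediate: the flat-state visited-marking algorithm; solution is
-- proved equal to flatA by a lockstep simulation, flatA equal to solution_alt by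
-- the cycle-structure argument (the step relation is a bijection).

-- the value of B's step at state (r,c,d) (the body of stepB after decoding)
def nxtF (grid : List String) (R C : Int) (r c d : Int) : Int :=
  let t := PySem.Dict.getD turnB
    ((PySem.Str.pyGet? ((PySem.List.pyGet? grid r).getD "") c).getD ' ') []
  let nd := PySem.List.pyGetD t d 0
  let dd := PySem.List.pyGetD deltaB nd (0, 0)
  (PySem.Int.mod (r + dd.1) R * C + PySem.Int.mod (c + dd.2) C) * 4 + nd

-- successor of every flat state id (r*C+c)*4+d, built once
def buildNxt (grid : List String) (R C : Int) : List Int :=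
  (PySem.List.pyRange 0 R 1).foldl (fun nx r =>
    (PySem.List.pyRange 0 C 1).foldl (fun nx c =>
      (PySem.List.pyRange 0 4 1).foldl (fun nx d =>
        nx ++ [nxtF grid R C r c d]) nx) nx) []

-- flat visited-marking walk (fuel-bounded)
def walkF (nxt : List Int) : Nat → List Bool → Int → Int → List Bool × Int
  | 0, vis, _, len => (vis, len)
  | f + 1, vis, cur, len =>
    if PySem.List.pyGetD vis cur true = false then
      walkF nxt f (PySem.List.pySetD vis cur true) (PySem.List.pyGetD nxt cur 0) (len + 1)
    else (vis, len)

def flatA (grid : List String) : List Int :=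
  let R : Int := PySem.List.len grid
  let C : Int := match grid with | [] => 0 | s :: _ => PySem.Str.len s
  let nxt := buildNxt grid R C
  let vis0 := List.replicate (4 * R * C).toNat false
  let fuel := (4 * R * C).toNat + 1
  let res := (PySem.List.pyRange 0 (4 * R * C) 1).foldl (fun st s =>
    if PySem.List.pyGetD st.1 s true = false then
      let w := walkF nxt fuel st.1 s 0
      (w.1, st.2 ++ [w.2])
    else st) (vis0, ([] : List Int))
  PySem.List.sorted res.2 id false

-- proof-side abstractions: Nat-indexed access into A's nested array / the flat list
def a3 (arr : List (List (List Int))) (r c d : Nat) : Int :=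
  ((arr.getD r []).getD c []).getD d (-1)

def a3set (arr : List (List (List Int))) (r c d : Nat) (v : Int) : List (List (List Int)) :=
  arr.set r ((arr.getD r []).set c (((arr.getD r []).getD c []).set d v))

def v1 (vis : List Bool) (s : Nat) : Bool := vis.getD s true

def enc (C r c d : Nat) : Nat := (r * C + c) * 4 + d

def gshape (R C : Nat) (arr : List (List (List Int))) : Prop :=
  arr.length = R ∧ ∀ row ∈ arr, row.length = C ∧ ∀ cell ∈ row, cell.length = 4

-- the simulation relation between A's nested array and the flat visited list
def SimRel (R C : Nat) (arr : List (List (List Int))) (vis : List Bool) : Prop :=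
  gshape R C arr ∧ vis.length = 4 * R * C ∧
  ∀ r c d : Nat, r < R → c < C → d < 4 →
    a3 arr r c d = (if v1 vis (enc C r c d) then 1 else 0)

theorem aGet_cast (arr : List (List (List Int))) (r c d : Nat) :
    aGet arr (r : Int) (c : Int) (d : Int) = a3 arr r c d := by
  simp [aGet, a3]

theorem aSet_cast (arr : List (List (List Int))) (r c d : Nat) (v : Int) :
    aSet arr (r : Int) (c : Int) (d : Int) v = a3set arr r c d v := by
  simp [aSet, a3set]

theorem getD_set_nat {α : Type} (xs : List α) (n m : Nat) (v d : α) (hn : n < xs.length) :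
    (xs.set n v).getD m d = if m = n then v else xs.getD m d := by
  simp only [List.getD_eq_getElem?_getD, List.getElem?_set]
  by_cases h : n = m
  · subst h; simp [hn]
  · rw [if_neg h, if_neg (fun hh : m = n => h hh.symm)]

theorem enc_lt (R C r c d : Nat) (hr : r < R) (hc : c < C) (hd : d < 4) :
    enc C r c d < 4 * R * C := by
  have h1 : r * C + c + 1 ≤ R * C := by
    calc r * C + c + 1 ≤ r * C + C := by omega
    _ = (r + 1) * C := by ring
    _ ≤ R * C := Nat.mul_le_mul_right C hr
  unfold enc
  calc (r * C + c) * 4 + d < (r * C + c + 1) * 4 := by omega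
  _ ≤ (R * C) * 4 := Nat.mul_le_mul_right 4 h1
  _ = 4 * R * C := by ring

theorem enc_inj (C r c d r' c' d' : Nat) (hc : c < C) (hc' : c' < C) (hd : d < 4)
    (hd' : d' < 4) (h : enc C r c d = enc C r' c' d') : r = r' ∧ c = c' ∧ d = d' := by
  unfold enc at h
  have h2 : r * C + c = r' * C + c' ∧ d = d' := by omega
  have hC : 0 < C := by omega
  have hr : (C * r + c) / C = r := by rw [Nat.mul_add_div hC, Nat.div_eq_of_lt hc, Nat.add_zero]
  have hr' : (C * r' + c') / C = r' := by rw [Nat.mul_add_div hC, Nat.div_eq_of_lt hc', Nat.add_zero]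
  have hmm : C * r + c = C * r' + c' := by
    rw [Nat.mul_comm C r, Nat.mul_comm C r']; exact h2.1
  have heq : r = r' := by rw [← hr, ← hr', hmm]
  have hcc : c = c' := by have := h2.1; subst heq; omega
  exact ⟨heq, hcc, h2.2⟩

theorem getD_mem {α : Type} (xs : List α) (n : Nat) (d : α) (h : n < xs.length) :
    xs.getD n d ∈ xs := by
  rw [List.getD_eq_getElem?_getD, List.getElem?_eq_getElem h]
  exact List.getElem_mem h

theorem SimRel_mark (R C : Nat) (arr : List (List (List Int))) (vis : List Bool)
    (r c d : Nat) (hRel : SimRel R C arr vis) (hr : r < R) (hc : c < C) (hd : d < 4) :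
    SimRel R C (a3set arr r c d 1) (vis.set (enc C r c d) true) := by
  obtain ⟨⟨hlen, hrows⟩, hvlen, hval⟩ := hRel
  have hrl : r < arr.length := by omega
  have hrowmem : arr.getD r [] ∈ arr := getD_mem arr r [] hrl
  obtain ⟨hrowC, hcells⟩ := hrows _ hrowmem
  have hcl : c < (arr.getD r []).length := by omega
  have hcellmem : (arr.getD r []).getD c [] ∈ arr.getD r [] := getD_mem _ c [] hcl
  have hcell4 : ((arr.getD r []).getD c []).length = 4 := hcells _ hcellmem
  have hdl : d < ((arr.getD r []).getD c []).length := by omega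
  have hencl : enc C r c d < vis.length := by rw [hvlen]; exact enc_lt R C r c d hr hc hd
  refine ⟨⟨by simpa [a3set] using hlen, ?_⟩, by simp [hvlen], ?_⟩
  · intro row hrow
    rcases List.mem_or_eq_of_mem_set hrow with hmem | hnew
    · exact hrows _ hmem
    · subst hnew
      refine ⟨by rw [List.length_set]; exact hrowC, ?_⟩
      intro cell hcell
      rcases List.mem_or_eq_of_mem_set hcell with hmem | hnew
      · exact hcells _ hmem
      · subst hnew; rw [List.length_set]; exact hcell4
  · intro r' c' d' hr' hc' hd'
    have hset : v1 (vis.set (enc C r c d) true) (enc C r' c' d') =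
        if enc C r' c' d' = enc C r c d then true else v1 vis (enc C r' c' d') := by
      unfold v1; exact getD_set_nat vis (enc C r c d) (enc C r' c' d') true true hencl
    unfold a3 a3set
    rw [getD_set_nat arr r r' _ [] hrl]
    by_cases hrr : r' = r
    · subst hrr
      rw [if_pos rfl, getD_set_nat _ c c' _ [] hcl]
      by_cases hcc : c' = c
      · subst hcc
        rw [if_pos rfl, getD_set_nat _ d d' _ (-1) hdl]
        by_cases hdd : d' = d
        · subst hdd
          rw [if_pos rfl, hset, if_pos rfl]
          simp
        · rw [if_neg hdd, hset,
            if_neg (fun hh => hdd (enc_inj C r' c' d' r' c' d hc' hc hd' hd hh).2.2)]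
          exact hval r' c' d' hr' hc' hd'
      · rw [if_neg hcc, hset,
          if_neg (fun hh => hcc (enc_inj C r' c' d' r' c d hc' hc hd' hd hh).2.1)]
        exact hval r' c' d' hr' hc' hd'
    · rw [if_neg hrr, hset,
        if_neg (fun hh => hrr (enc_inj C r' c' d' r c d hc' hc hd' hd hh).1)]
      exact hval r' c' d' hr' hc' hd'

-- buildNxt as a flat concatenation
theorem buildNxt_eq (grid : List String) (R C : Nat) :
    buildNxt grid (R : Int) (C : Int) =
      (List.range R).flatMap (fun (r : Nat) => (List.range C).flatMap (fun (c : Nat) =>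
        (List.range 4).map (fun (d : Nat) => nxtF grid (R : Int) (C : Int) (r : Int) (c : Int) (d : Int)))) := by
  have h4 : PySem.List.pyRange 0 4 1 = List.map (fun k : Nat => (k : Int)) (List.range 4) := by
    decide
  unfold buildNxt
  simp only [h4, PySem.List.pyRange_zero_nat, List.foldl_map,
    PySem.List.foldl_append_singleton_eq_map, PySem.List.foldl_append_eq_flatMap,
    List.nil_append, List.flatMap_map, List.map_map, Function.comp_def]

theorem flat_len {α : Type} (n k : Nat) (g : Nat → List α)
    (hl : ∀ i < n, (g i).length = k) : ((List.range n).flatMap g).length = n * k := by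
  induction n with
  | zero => simp
  | succ n ih =>
    rw [List.range_succ, List.flatMap_append, List.length_append,
      ih (fun i hi => hl i (by omega))]
    simp [hl n (by omega)]; ring

theorem flat_getD {α : Type} (n k : Nat) (g : Nat → List α) (i j : Nat) (dflt : α)
    (hl : ∀ i < n, (g i).length = k) (hi : i < n) (hj : j < k) :
    ((List.range n).flatMap g).getD (i * k + j) dflt = (g i).getD j dflt := by
  induction n with
  | zero => omega
  | succ n ih =>
    rw [List.range_succ, List.flatMap_append]
    by_cases h : i < n
    · rw [List.getD_append]
      · exact ih (fun t ht => hl t (by omega)) h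
      · rw [flat_len n k g (fun t ht => hl t (by omega))]
        have : i * k + j < i * k + k := by omega
        have h2 : i * k + k = (i + 1) * k := by ring
        have h3 : (i + 1) * k ≤ n * k := Nat.mul_le_mul_right k (by omega)
        omega
    · have hin : i = n := by omega
      subst hin
      rw [List.getD_append_right]
      · rw [flat_len i k g (fun t ht => hl t (by omega))]
        simp [hl i (by omega), hj]
      · rw [flat_len i k g (fun t ht => hl t (by omega))]
        omega

theorem nxt_getD (grid : List String) (R C r c d : Nat)
    (hr : r < R) (hc : c < C) (hd : d < 4) :
    (buildNxt grid (R : Int) (C : Int)).getD (enc C r c d) 0 =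
      nxtF grid (R : Int) (C : Int) (r : Int) (c : Int) (d : Int) := by
  rw [buildNxt_eq]
  have he : enc C r c d = r * (C * 4) + (c * 4 + d) := by unfold enc; ring
  have hl1 : ∀ i < R, ((List.range C).flatMap (fun (c : Nat) => (List.range 4).map
      (fun (d : Nat) => nxtF grid (R : Int) (C : Int) (i : Int) (c : Int) (d : Int)))).length = C * 4 :=
    fun i _ => flat_len C 4 _ (fun t _ => by simp)
  rw [he, flat_getD R (C * 4) _ r (c * 4 + d) 0 hl1 hr (by omega),
    flat_getD C 4 _ c d 0 (fun t _ => by simp) hc hd]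
  simp [List.getD_eq_getElem?_getD, List.getElem?_map, List.getElem?_range, hd]

-- integer modulo wrap facts (Python % with a positive divisor is Int.emod)
theorem emodId (c C : Nat) (h : c < C) : ((c : Int)) % (C : Int) = (c : Int) :=
  Int.emod_eq_of_lt (by positivity) (by push_cast; omega)

theorem emodDec (r R : Nat) (h : r < R) :
    ((r : Int) - 1) % (R : Int) = ((if r = 0 then R - 1 else r - 1 : Nat) : Int) := by
  split_ifs with h0
  · subst h0
    have h1 : ((-1 : Int) + (R : Int) * 1) % (R : Int) = (-1 : Int) % (R : Int) :=
      Int.add_mul_emod_self_left (-1) (R : Int) 1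
    rw [show (-1 : Int) + (R : Int) * 1 = (R : Int) - 1 by ring] at h1
    have h2 : ((R : Int) - 1) % (R : Int) = (R : Int) - 1 :=
      Int.emod_eq_of_lt (by omega) (by omega)
    rw [show ((0 : Nat) : Int) - 1 = (-1 : Int) by norm_num, ← h1, h2]
    omega
  · rw [show ((r : Int) - 1) = ((r - 1 : Nat) : Int) by push_cast [h0]; omega]
    exact Int.emod_eq_of_lt (by positivity) (by push_cast; omega)

theorem emodInc (r R : Nat) (h : r < R) :
    ((r : Int) + 1) % (R : Int) = ((if r + 1 = R then 0 else r + 1 : Nat) : Int) := by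
  split_ifs with h0
  · rw [show ((r : Int) + 1) = (R : Int) by push_cast [← h0]; ring, Int.emod_self]
    simp
  · rw [show ((r : Int) + 1) = ((r + 1 : Nat) : Int) by push_cast; ring]
    exact Int.emod_eq_of_lt (by positivity) (by push_cast; omega)

-- Pre_solution, read back on the character-list side
theorem pre_bridge (grid : List String) (hPre : Pre_solution grid) :
    ∀ s ∈ grid, (grid.headD "").toList.length ≤ s.toList.length ∧
      ∀ ch ∈ s.toList.take (grid.headD "").toList.length, ch = 'S' ∨ ch = 'L' ∨ ch = 'R' := by
  intro s hs
  obtain ⟨h1, h2⟩ := hPre s hs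
  rw [PySem.Str.len_eq, PySem.Str.len_eq] at h1
  have h1' : (grid.headD "").toList.length ≤ s.toList.length := by exact_mod_cast h1
  refine ⟨h1', ?_⟩
  intro ch hch
  obtain ⟨i, hi, hieq⟩ := List.getElem_of_mem hch
  have hiC : i < (grid.headD "").toList.length := by
    rw [List.length_take] at hi; omega
  have hilen : i < s.toList.length := by omega
  have hval : (s.toList.take (grid.headD "").toList.length)[i]'hi = s.toList[i]'hilen :=
    List.getElem_take
  have htoNat : (PySem.Str.len (grid.headD "")).toNat = (grid.headD "").toList.length := by
    rw [PySem.Str.len_eq, Int.toNat_natCast]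
  have hp := h2 i (by rw [htoNat]; exact hiC)
  have hget : PySem.Str.pyGet? s (i : Int) = some (s.toList[i]'hilen) := by
    rw [show PySem.Str.pyGet? = fun (t : String) k => PySem.List.pyGet? t.toList k from rfl]
    show PySem.List.pyGet? s.toList (i : Int) = _
    rw [PySem.List.pyGet?_natCast, List.getElem?_eq_getElem hilen]
  rw [hget] at hp
  rw [← hieq, hval]
  rcases hp with h | h | h
  · exact Or.inl (Option.some.inj h)
  · exact Or.inr (Or.inl (Option.some.inj h))
  · exact Or.inr (Or.inr (Option.some.inj h))

-- the key step lemma: A's if-ladder and B's table entry denote the same move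
theorem step_spec (grid : List String) (R C : Nat) (hR : grid.length = R)
    (hC : (grid.headD "").toList.length = C) (hPre : Pre_solution grid)
    (r c d : Nat) (hr : r < R) (hc : c < C) (hd : d < 4) :
    ∃ r' c' d' : Nat, r' < R ∧ c' < C ∧ d' < 4 ∧
      getNextA grid (r : Int) (c : Int) (d : Int) = ((r' : Int), (c' : Int), (d' : Int)) ∧
      nxtF grid (R : Int) (C : Int) (r : Int) (c : Int) (d : Int) = ((enc C r' c' d' : Nat) : Int) := by
  have hR0 : 0 < R := by omega
  have hrl : r < grid.length := by omega
  obtain ⟨s, hs⟩ : ∃ t, grid[(r : Nat)]? = some t := ⟨_, List.getElem?_eq_getElem hrl⟩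
  have hsmem : s ∈ grid := List.mem_of_getElem? hs
  obtain ⟨hslen, hschars⟩ := pre_bridge grid hPre s hsmem
  rw [hC] at hslen hschars
  have hcs : c < s.toList.length := Nat.lt_of_lt_of_le hc hslen
  have hch : (PySem.Str.pyGet? ((PySem.List.pyGet? grid (r : Int)).getD "") (c : Int)).getD ' ' =
      s.toList[c]'hcs := by
    rw [show PySem.Str.pyGet? = fun (t : String) i => PySem.List.pyGet? t.toList i from rfl]
    rw [PySem.List.pyGet?_natCast, hs]
    show (PySem.List.pyGet? s.toList (c : Int)).getD ' ' = _
    rw [PySem.List.pyGet?_natCast, List.getElem?_eq_getElem hcs]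
    rfl
  have htake : s.toList[c]'hcs ∈ s.toList.take C := by
    have h1 : c < (s.toList.take C).length := by rw [List.length_take]; omega
    have h2 : (s.toList.take C)[c]'h1 = s.toList[c]'hcs := List.getElem_take
    exact h2 ▸ List.getElem_mem h1
  have hSLR := hschars _ htake
  have hRlen : PySem.List.len grid = (R : Int) := by rw [PySem.List.len_eq, hR]
  have hClen : PySem.Str.len ((PySem.List.pyGet? grid 0).getD "") = (C : Int) := by
    rcases grid with _ | ⟨g0, gs⟩
    · simp at hrl
    · rw [PySem.List.pyGet?_zero_cons]
      rw [PySem.Str.len_eq]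
      simp only [List.headD] at hC
      simp [hC]
  have hgr : grid[(r : Nat)]?.getD "" = s := by rw [hs]; rfl
  have hClen2 : ((PySem.List.pyGet? grid 0).getD "").length = C := by
    rcases grid with _ | ⟨g0, gs⟩
    · simp at hrl
    · rw [PySem.List.pyGet?_zero_cons]
      simp only [Option.getD_some]
      simpa using hC
  have hRp : (0 : Int) < (R : Int) := by exact_mod_cast hR0
  have hCp : (0 : Int) < (C : Int) := by exact_mod_cast (show 0 < C by omega)
  rcases hSLR with hchar | hchar | hchar <;> rw [hchar] at hch <;> interval_cases d
  -- 'S', d = 0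
  · set v' := (if r = 0 then R - 1 else r - 1 : Nat) with hv'def
    refine ⟨v', c, 0, by rw [hv'def]; split_ifs <;> omega, hc, by omega, ?_, ?_⟩
    · simp [getNextA, hR, hgr, hClen2, hchar, List.getElem?_eq_getElem hcs]
      all_goals try rw [hv'def]
      all_goals try split_ifs
      all_goals omega
    · simp only [nxtF, hch]
      rw [show PySem.List.pyGetD (turnB.getD 'S' []) ((0 : Nat) : Int) 0 = 0 from by decide,
        show PySem.List.pyGetD deltaB (0 : Int) ((0 : Int), (0 : Int)) = ((-1 : Int), (0 : Int)) from by decide]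
      rw [PySem.Int.mod_eq_emod_of_pos hRp, PySem.Int.mod_eq_emod_of_pos hCp]
      norm_num
      rw [show ((r : Int) + -1) = ((r : Int) - 1) from by ring]
      rw [emodDec r R hr, emodId c C hc, ← hv'def]
      simp only [enc]
      push_cast
      ring
  -- 'S', d = 1
  · set v' := (if r + 1 = R then 0 else r + 1 : Nat) with hv'def
    refine ⟨v', c, 1, by rw [hv'def]; split_ifs <;> omega, hc, by omega, ?_, ?_⟩
    · simp [getNextA, hR, hgr, hClen2, hchar, List.getElem?_eq_getElem hcs]
      all_goals try rw [hv'def]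
      all_goals try split_ifs
      all_goals omega
    · simp only [nxtF, hch]
      rw [show PySem.List.pyGetD (turnB.getD 'S' []) ((1 : Nat) : Int) 0 = 1 from by decide,
        show PySem.List.pyGetD deltaB (1 : Int) ((0 : Int), (0 : Int)) = ((1 : Int), (0 : Int)) from by decide]
      rw [PySem.Int.mod_eq_emod_of_pos hRp, PySem.Int.mod_eq_emod_of_pos hCp]
      norm_num
      rw [emodInc r R hr, emodId c C hc, ← hv'def]
      simp only [enc]
      push_cast
      ring
  -- 'S', d = 2
  · set v' := (if c = 0 then C - 1 else c - 1 : Nat) with hv'def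
    refine ⟨r, v', 2, hr, by rw [hv'def]; split_ifs <;> omega, by omega, ?_, ?_⟩
    · simp [getNextA, hR, hgr, hClen2, hchar, List.getElem?_eq_getElem hcs]
      all_goals try rw [hv'def]
      all_goals try split_ifs
      all_goals omega
    · simp only [nxtF, hch]
      rw [show PySem.List.pyGetD (turnB.getD 'S' []) ((2 : Nat) : Int) 0 = 2 from by decide,
        show PySem.List.pyGetD deltaB (2 : Int) ((0 : Int), (0 : Int)) = ((0 : Int), (-1 : Int)) from by decide]
      rw [PySem.Int.mod_eq_emod_of_pos hRp, PySem.Int.mod_eq_emod_of_pos hCp]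
      norm_num
      rw [show ((c : Int) + -1) = ((c : Int) - 1) from by ring]
      rw [emodId r R hr, emodDec c C hc, ← hv'def]
      simp only [enc]
      push_cast
      ring
  -- 'S', d = 3
  · set v' := (if c + 1 = C then 0 else c + 1 : Nat) with hv'def
    refine ⟨r, v', 3, hr, by rw [hv'def]; split_ifs <;> omega, by omega, ?_, ?_⟩
    · simp [getNextA, hR, hgr, hClen2, hchar, List.getElem?_eq_getElem hcs]
      all_goals try rw [hv'def]
      all_goals try split_ifs
      all_goals omega
    · simp only [nxtF, hch]
      rw [show PySem.List.pyGetD (turnB.getD 'S' []) ((3 : Nat) : Int) 0 = 3 from by decide,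
        show PySem.List.pyGetD deltaB (3 : Int) ((0 : Int), (0 : Int)) = ((0 : Int), (1 : Int)) from by decide]
      rw [PySem.Int.mod_eq_emod_of_pos hRp, PySem.Int.mod_eq_emod_of_pos hCp]
      norm_num
      rw [emodId r R hr, emodInc c C hc, ← hv'def]
      simp only [enc]
      push_cast
      ring
  -- 'L', d = 0
  · set v' := (if c = 0 then C - 1 else c - 1 : Nat) with hv'def
    refine ⟨r, v', 2, hr, by rw [hv'def]; split_ifs <;> omega, by omega, ?_, ?_⟩
    · simp [getNextA, hR, hgr, hClen2, hchar, List.getElem?_eq_getElem hcs]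
      all_goals try rw [hv'def]
      all_goals try split_ifs
      all_goals omega
    · simp only [nxtF, hch]
      rw [show PySem.List.pyGetD (turnB.getD 'L' []) ((0 : Nat) : Int) 0 = 2 from by decide,
        show PySem.List.pyGetD deltaB (2 : Int) ((0 : Int), (0 : Int)) = ((0 : Int), (-1 : Int)) from by decide]
      rw [PySem.Int.mod_eq_emod_of_pos hRp, PySem.Int.mod_eq_emod_of_pos hCp]
      norm_num
      rw [show ((c : Int) + -1) = ((c : Int) - 1) from by ring]
      rw [emodId r R hr, emodDec c C hc, ← hv'def]
      simp only [enc]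
      push_cast
      ring
  -- 'L', d = 1
  · set v' := (if c + 1 = C then 0 else c + 1 : Nat) with hv'def
    refine ⟨r, v', 3, hr, by rw [hv'def]; split_ifs <;> omega, by omega, ?_, ?_⟩
    · simp [getNextA, hR, hgr, hClen2, hchar, List.getElem?_eq_getElem hcs]
      all_goals try rw [hv'def]
      all_goals try split_ifs
      all_goals omega
    · simp only [nxtF, hch]
      rw [show PySem.List.pyGetD (turnB.getD 'L' []) ((1 : Nat) : Int) 0 = 3 from by decide,
        show PySem.List.pyGetD deltaB (3 : Int) ((0 : Int), (0 : Int)) = ((0 : Int), (1 : Int)) from by decide]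
      rw [PySem.Int.mod_eq_emod_of_pos hRp, PySem.Int.mod_eq_emod_of_pos hCp]
      norm_num
      rw [emodId r R hr, emodInc c C hc, ← hv'def]
      simp only [enc]
      push_cast
      ring
  -- 'L', d = 2
  · set v' := (if r + 1 = R then 0 else r + 1 : Nat) with hv'def
    refine ⟨v', c, 1, by rw [hv'def]; split_ifs <;> omega, hc, by omega, ?_, ?_⟩
    · simp [getNextA, hR, hgr, hClen2, hchar, List.getElem?_eq_getElem hcs]
      all_goals try rw [hv'def]
      all_goals try split_ifs
      all_goals omega
    · simp only [nxtF, hch]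
      rw [show PySem.List.pyGetD (turnB.getD 'L' []) ((2 : Nat) : Int) 0 = 1 from by decide,
        show PySem.List.pyGetD deltaB (1 : Int) ((0 : Int), (0 : Int)) = ((1 : Int), (0 : Int)) from by decide]
      rw [PySem.Int.mod_eq_emod_of_pos hRp, PySem.Int.mod_eq_emod_of_pos hCp]
      norm_num
      rw [emodInc r R hr, emodId c C hc, ← hv'def]
      simp only [enc]
      push_cast
      ring
  -- 'L', d = 3
  · set v' := (if r = 0 then R - 1 else r - 1 : Nat) with hv'def
    refine ⟨v', c, 0, by rw [hv'def]; split_ifs <;> omega, hc, by omega, ?_, ?_⟩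
    · simp [getNextA, hR, hgr, hClen2, hchar, List.getElem?_eq_getElem hcs]
      all_goals try rw [hv'def]
      all_goals try split_ifs
      all_goals omega
    · simp only [nxtF, hch]
      rw [show PySem.List.pyGetD (turnB.getD 'L' []) ((3 : Nat) : Int) 0 = 0 from by decide,
        show PySem.List.pyGetD deltaB (0 : Int) ((0 : Int), (0 : Int)) = ((-1 : Int), (0 : Int)) from by decide]
      rw [PySem.Int.mod_eq_emod_of_pos hRp, PySem.Int.mod_eq_emod_of_pos hCp]
      norm_num
      rw [show ((r : Int) + -1) = ((r : Int) - 1) from by ring]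
      rw [emodDec r R hr, emodId c C hc, ← hv'def]
      simp only [enc]
      push_cast
      ring
  -- 'R', d = 0
  · set v' := (if c + 1 = C then 0 else c + 1 : Nat) with hv'def
    refine ⟨r, v', 3, hr, by rw [hv'def]; split_ifs <;> omega, by omega, ?_, ?_⟩
    · simp [getNextA, hR, hgr, hClen2, hchar, List.getElem?_eq_getElem hcs]
      all_goals try rw [hv'def]
      all_goals try split_ifs
      all_goals omega
    · simp only [nxtF, hch]
      rw [show PySem.List.pyGetD (turnB.getD 'R' []) ((0 : Nat) : Int) 0 = 3 from by decide,
        show PySem.List.pyGetD deltaB (3 : Int) ((0 : Int), (0 : Int)) = ((0 : Int), (1 : Int)) from by decide]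
      rw [PySem.Int.mod_eq_emod_of_pos hRp, PySem.Int.mod_eq_emod_of_pos hCp]
      norm_num
      rw [emodId r R hr, emodInc c C hc, ← hv'def]
      simp only [enc]
      push_cast
      ring
  -- 'R', d = 1
  · set v' := (if c = 0 then C - 1 else c - 1 : Nat) with hv'def
    refine ⟨r, v', 2, hr, by rw [hv'def]; split_ifs <;> omega, by omega, ?_, ?_⟩
    · simp [getNextA, hR, hgr, hClen2, hchar, List.getElem?_eq_getElem hcs]
      all_goals try rw [hv'def]
      all_goals try split_ifs
      all_goals omega
    · simp only [nxtF, hch]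
      rw [show PySem.List.pyGetD (turnB.getD 'R' []) ((1 : Nat) : Int) 0 = 2 from by decide,
        show PySem.List.pyGetD deltaB (2 : Int) ((0 : Int), (0 : Int)) = ((0 : Int), (-1 : Int)) from by decide]
      rw [PySem.Int.mod_eq_emod_of_pos hRp, PySem.Int.mod_eq_emod_of_pos hCp]
      norm_num
      rw [show ((c : Int) + -1) = ((c : Int) - 1) from by ring]
      rw [emodId r R hr, emodDec c C hc, ← hv'def]
      simp only [enc]
      push_cast
      ring
  -- 'R', d = 2
  · set v' := (if r = 0 then R - 1 else r - 1 : Nat) with hv'def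
    refine ⟨v', c, 0, by rw [hv'def]; split_ifs <;> omega, hc, by omega, ?_, ?_⟩
    · simp [getNextA, hR, hgr, hClen2, hchar, List.getElem?_eq_getElem hcs]
      all_goals try rw [hv'def]
      all_goals try split_ifs
      all_goals omega
    · simp only [nxtF, hch]
      rw [show PySem.List.pyGetD (turnB.getD 'R' []) ((2 : Nat) : Int) 0 = 0 from by decide,
        show PySem.List.pyGetD deltaB (0 : Int) ((0 : Int), (0 : Int)) = ((-1 : Int), (0 : Int)) from by decide]
      rw [PySem.Int.mod_eq_emod_of_pos hRp, PySem.Int.mod_eq_emod_of_pos hCp]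
      norm_num
      rw [show ((r : Int) + -1) = ((r : Int) - 1) from by ring]
      rw [emodDec r R hr, emodId c C hc, ← hv'def]
      simp only [enc]
      push_cast
      ring
  -- 'R', d = 3
  · set v' := (if r + 1 = R then 0 else r + 1 : Nat) with hv'def
    refine ⟨v', c, 1, by rw [hv'def]; split_ifs <;> omega, hc, by omega, ?_, ?_⟩
    · simp [getNextA, hR, hgr, hClen2, hchar, List.getElem?_eq_getElem hcs]
      all_goals try rw [hv'def]
      all_goals try split_ifs
      all_goals omega
    · simp only [nxtF, hch]
      rw [show PySem.List.pyGetD (turnB.getD 'R' []) ((3 : Nat) : Int) 0 = 1 from by decide,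
        show PySem.List.pyGetD deltaB (1 : Int) ((0 : Int), (0 : Int)) = ((1 : Int), (0 : Int)) from by decide]
      rw [PySem.Int.mod_eq_emod_of_pos hRp, PySem.Int.mod_eq_emod_of_pos hCp]
      norm_num
      rw [emodInc r R hr, emodId c C hc, ← hv'def]
      simp only [enc]
      push_cast
      ring

-- lockstep simulation of A's while loop against the flat walk
theorem walk_sim (grid : List String) (R C : Nat) (nxt : List Int)
    (hR : grid.length = R) (hC : (grid.headD "").toList.length = C)
    (hPre : Pre_solution grid) (hnxt : nxt = buildNxt grid (R : Int) (C : Int)) :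
    ∀ (f : Nat) (arr : List (List (List Int))) (vis : List Bool) (r c d : Nat) (len : Int),
      SimRel R C arr vis → r < R → c < C → d < 4 →
      (walkA grid f arr (r : Int) (c : Int) (d : Int) len).2 =
        (walkF nxt f vis ((enc C r c d : Nat) : Int) len).2 ∧
      SimRel R C (walkA grid f arr (r : Int) (c : Int) (d : Int) len).1
        (walkF nxt f vis ((enc C r c d : Nat) : Int) len).1 := by
  intro f
  induction f with
  | zero => intro arr vis r c d len hRel hr hc hd; exact ⟨rfl, hRel⟩
  | succ f ih =>
    intro arr vis r c d len hRel hr hc hd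
    have hval := hRel.2.2 r c d hr hc hd
    have hcond : PySem.List.pyGetD vis ((enc C r c d : Nat) : Int) true = v1 vis (enc C r c d) := by
      rw [PySem.List.pyGetD_natCast]; rfl
    obtain ⟨r', c', d', hr', hc', hd', hstepA, hstepB⟩ :=
      step_spec grid R C hR hC hPre r c d hr hc hd
    by_cases hv : v1 vis (enc C r c d) = true
    · have ha : a3 arr r c d = 1 := by rw [hval, if_pos hv]
      simp only [walkA, walkF, aGet_cast, ha, hcond, hv]
      norm_num
      exact ⟨hRel.1, hRel.2.1, hRel.2.2⟩
    · have ha : a3 arr r c d = 0 := by rw [hval, if_neg hv]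
      have hb : v1 vis (enc C r c d) = false := by
        cases h : v1 vis (enc C r c d) <;> simp_all
      have hgetnxt : nxt[enc C r c d]?.getD 0 = ((enc C r' c' d' : Nat) : Int) := by
        rw [← List.getD_eq_getElem?_getD, hnxt, nxt_getD grid R C r c d hr hc hd, hstepB]
      simp only [walkA, walkF, aGet_cast, ha, hcond, hb]
      norm_num
      rw [aSet_cast, hstepA, hgetnxt]
      exact ih _ _ r' c' d' (len + 1)
        (SimRel_mark R C arr vis r c d hRel hr hc hd) hr' hc' hd'

theorem foldl_range_mul {α : Type} (f : α → Nat → α) (n k : Nat) (z : α) :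
    (List.range (n * k)).foldl f z =
      (List.range n).foldl (fun z i => (List.range k).foldl (fun z j => f z (i * k + j)) z) z := by
  induction n generalizing z with
  | zero => simp
  | succ n ih =>
    rw [show (n + 1) * k = n * k + k by ring, List.range_add, List.foldl_append,
      List.range_succ, List.foldl_append, ih, List.foldl_map]
    simp only [List.foldl_cons, List.foldl_nil]

theorem foldl_rel {α β γ : Type} (Rl : α → β → Prop) (f : α → γ → α) (g : β → γ → β)
    (P : γ → Prop) : ∀ (l : List γ) (a : α) (b : β), (∀ x ∈ l, P x) → Rl a b →
    (∀ a b x, P x → Rl a b → Rl (f a x) (g b x)) → Rl (l.foldl f a) (l.foldl g b) := by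
  intro l
  induction l with
  | nil => intro a b _ h _; exact h
  | cons x xs ih =>
    intro a b hP h hstep
    exact ih _ _ (fun y hy => hP y (by simp [hy])) (hstep a b x (hP x (by simp)) h) hstep

theorem getD_elem_0123 (d : Nat) (hd : d < 4) : ([0, 0, 0, 0] : List Int).getD d (-1) = 0 := by
  interval_cases d <;> rfl

theorem SimRel_init (R C : Nat) :
    SimRel R C (List.replicate R (List.replicate C ([0, 0, 0, 0] : List Int)))
      (List.replicate (4 * R * C) false) := by
  refine ⟨⟨List.length_replicate, ?_⟩, List.length_replicate, ?_⟩
  · intro row hrow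
    rw [List.eq_of_mem_replicate hrow]
    refine ⟨List.length_replicate, ?_⟩
    intro cell hcell
    rw [List.eq_of_mem_replicate hcell]
    rfl
  · intro r c d hr hc hd
    unfold a3 v1
    rw [List.getD_replicate _ hr, List.getD_replicate _ hc, getD_elem_0123 d hd,
      List.getD_replicate _ (enc_lt R C r c d hr hc hd)]
    rfl

-- solution equals the flat-state marking algorithm (lockstep simulation)
theorem main_eq (grid : List String) (hPre : Pre_solution grid) :
    solution grid = flatA grid := by
  obtain ⟨Rn, hR⟩ : ∃ n, grid.length = n := ⟨_, rfl⟩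
  obtain ⟨Cn, hC⟩ : ∃ n, (grid.headD "").toList.length = n := ⟨_, rfl⟩
  have h4 : PySem.List.pyRange 0 4 1 = List.map (fun k : Nat => (k : Int)) (List.range 4) := by
    decide
  have hRlen : PySem.List.len grid = (Rn : Int) := by rw [PySem.List.len_eq, hR]
  have hClenA : PySem.Str.len ((PySem.List.pyGet? grid 0).getD "") = (Cn : Int) := by
    rcases grid with _ | ⟨g0, gs⟩
    · rw [PySem.List.pyGet?_zero]
      simp only [List.getElem?_nil, Option.getD_none]
      rw [PySem.Str.len_eq]
      simp only [List.headD_nil] at hC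
      rw [hC]
    · rw [PySem.List.pyGet?_zero_cons]
      simp only [Option.getD_some]
      rw [PySem.Str.len_eq]
      simp only [List.headD_cons] at hC
      rw [hC]
  by_cases hnil : grid = []
  · rw [hnil]; rfl
  · obtain ⟨g0, gs, hg⟩ := List.exists_cons_of_ne_nil hnil
    subst hg
    have hClenB : PySem.Str.len g0 = (Cn : Int) := by
      rw [PySem.Str.len_eq]
      simp only [List.headD_cons] at hC
      rw [hC]
    unfold solution flatA
    simp only [hRlen, hClenA, hClenB]
    rw [show ((Rn : Int) * (Cn : Int) * 4).toNat = 4 * Rn * Cn by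
        rw [show ((Rn : Int) * (Cn : Int) * 4) = ((4 * Rn * Cn : Nat) : Int) by push_cast; ring,
          Int.toNat_natCast],
      show ((4 : Int) * (Rn : Int) * (Cn : Int)).toNat = 4 * Rn * Cn by
        rw [show ((4 : Int) * (Rn : Int) * (Cn : Int)) = ((4 * Rn * Cn : Nat) : Int) by
          push_cast; ring, Int.toNat_natCast],
      show ((4 : Int) * (Rn : Int) * (Cn : Int)) = ((Rn * (Cn * 4) : Nat) : Int) by
        push_cast; ring]
    simp only [h4, PySem.List.pyRange_zero_nat, List.foldl_map, List.map_map,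
      Function.comp_def, List.map_const', List.length_range,
      PySem.List.foldl_append_singleton_eq_map, List.nil_append]
    rw [foldl_range_mul]
    simp only [foldl_range_mul]
    have hPre' := hPre
    have hR' : (g0 :: gs).length = Rn := hR
    have hC' : ((g0 :: gs).headD "").toList.length = Cn := hC
    refine congrArg (fun l => PySem.List.sorted l id false)
      (foldl_rel
        (fun (p : List (List (List Int)) × List Int) (q : List Bool × List Int) =>
          SimRel Rn Cn p.1 q.1 ∧ p.2 = q.2) _ _ (fun i => i < Rn) (List.range Rn) _ _
        (fun x hx => List.mem_range.mp hx) ⟨SimRel_init Rn Cn, rfl⟩ ?_).2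
    intro a b r hrlt hab
    refine foldl_rel
      (fun (p : List (List (List Int)) × List Int) (q : List Bool × List Int) =>
        SimRel Rn Cn p.1 q.1 ∧ p.2 = q.2) _ _ (fun i => i < Cn) (List.range Cn) _ _
      (fun x hx => List.mem_range.mp hx) hab ?_
    intro a b c hclt hab
    refine foldl_rel
      (fun (p : List (List (List Int)) × List Int) (q : List Bool × List Int) =>
        SimRel Rn Cn p.1 q.1 ∧ p.2 = q.2) _ _ (fun i => i < 4) (List.range 4) _ _
      (fun x hx => List.mem_range.mp hx) hab ?_
    intro a b d hdlt hab
    obtain ⟨hrelst, hansst⟩ := hab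
    have hidx : r * (Cn * 4) + (c * 4 + d) = enc Cn r c d := by unfold enc; ring
    rw [hidx]
    have hval := hrelst.2.2 r c d hrlt hclt hdlt
    have hcond : PySem.List.pyGetD b.1 ((enc Cn r c d : Nat) : Int) true =
        v1 b.1 (enc Cn r c d) := by rw [PySem.List.pyGetD_natCast]; rfl
    obtain ⟨r', c', d', hr', hc', hd', hstepA, hstepB⟩ :=
      step_spec (g0 :: gs) Rn Cn hR' hC' hPre' r c d hrlt hclt hdlt
    by_cases hv : v1 b.1 (enc Cn r c d) = true
    · have ha : a3 a.1 r c d = 1 := by rw [hval, if_pos hv]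
      rw [aGet_cast, ha, hcond, hv, if_neg (by norm_num), if_neg (by norm_num)]
      exact ⟨hrelst, hansst⟩
    · have ha : a3 a.1 r c d = 0 := by rw [hval, if_neg hv]
      have hb : v1 b.1 (enc Cn r c d) = false := by
        cases h : v1 b.1 (enc Cn r c d) <;> simp_all
      rw [aGet_cast, ha, hcond, hb, if_pos rfl, if_pos rfl]
      have e1 : (getNextA (g0 :: gs) (r : Int) (c : Int) (d : Int)).1 = ((r' : Nat) : Int) := by
        rw [hstepA]
      have e2 : (getNextA (g0 :: gs) (r : Int) (c : Int) (d : Int)).2.1 = ((c' : Nat) : Int) := by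
        rw [hstepA]
      have e3 : (getNextA (g0 :: gs) (r : Int) (c : Int) (d : Int)).2.2 = ((d' : Nat) : Int) := by
        rw [hstepA]
      have hgetnxt : (buildNxt (g0 :: gs) (Rn : Int) (Cn : Int))[enc Cn r c d]?.getD 0 =
          ((enc Cn r' c' d' : Nat) : Int) := by
        rw [← List.getD_eq_getElem?_getD, nxt_getD (g0 :: gs) Rn Cn r c d hrlt hclt hdlt, hstepB]
      rw [aSet_cast, e1, e2, e3]
      simp only [walkF]
      rw [hcond, hb]
      norm_num
      rw [hgetnxt]
      obtain ⟨hw1, hw2⟩ := walk_sim (g0 :: gs) Rn Cn (buildNxt (g0 :: gs) (Rn : Int) (Cn : Int))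
        hR' hC' hPre' rfl (4 * Rn * Cn) (a3set a.1 r c d 1)
        (b.1.set (enc Cn r c d) true) r' c' d' 1
        (SimRel_mark Rn Cn a.1 b.1 r c d hrelst hrlt hclt hdlt) hr' hc' hd'
      exact ⟨hw2, hansst, hw1⟩

-- ========== second half: the flat marking algorithm equals B (cycle structure) ==========

-- the flat successor function, as a Nat → Nat map
def gfun (grid : List String) (R C : Nat) (s : Nat) : Nat :=
  (nxtF grid (R : Int) (C : Int) ((s / 4 / C : Nat) : Int) ((s / 4 % C : Nat) : Int)
    ((s % 4 : Nat) : Int)).toNat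

theorem state_decomp (R C t : Nat) (ht : t < 4 * R * C) :
    t / 4 / C < R ∧ t / 4 % C < C ∧ t % 4 < 4 ∧ enc C (t / 4 / C) (t / 4 % C) (t % 4) = t := by
  have hM : 4 * R * C = 4 * (R * C) := by ring
  have hC : 0 < C := by
    rcases Nat.eq_zero_or_pos C with h | h
    · subst h; simp at ht
    · exact h
  have h1 : t / 4 < R * C := by omega
  have hr : t / 4 / C < R := by
    rw [Nat.div_lt_iff_lt_mul hC]; omega
  refine ⟨hr, Nat.mod_lt _ hC, Nat.mod_lt _ (by omega), ?_⟩
  unfold enc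
  have h2 : t / 4 / C * C + t / 4 % C = t / 4 := by
    rw [Nat.mul_comm]; exact Nat.div_add_mod (t / 4) C
  calc (t / 4 / C * C + t / 4 % C) * 4 + t % 4 = t / 4 * 4 + t % 4 := by rw [h2]
    _ = t := by omega
-- the character scanned at a cell is 'S', 'L' or 'R' under Pre_solution
theorem char_SLR (grid : List String) (R C : Nat) (hR : grid.length = R)
    (hC : (grid.headD "").toList.length = C) (hPre : Pre_solution grid)
    (r c : Nat) (hr : r < R) (hc : c < C) :
    (PySem.Str.pyGet? ((PySem.List.pyGet? grid (r : Int)).getD "") (c : Int)).getD ' ' = 'S' ∨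
    (PySem.Str.pyGet? ((PySem.List.pyGet? grid (r : Int)).getD "") (c : Int)).getD ' ' = 'L' ∨
    (PySem.Str.pyGet? ((PySem.List.pyGet? grid (r : Int)).getD "") (c : Int)).getD ' ' = 'R' := by
  have hrl : r < grid.length := by omega
  obtain ⟨s, hs⟩ : ∃ t, grid[(r : Nat)]? = some t := ⟨_, List.getElem?_eq_getElem hrl⟩
  have hsmem : s ∈ grid := List.mem_of_getElem? hs
  obtain ⟨hslen, hschars⟩ := pre_bridge grid hPre s hsmem
  rw [hC] at hslen hschars
  have hcs : c < s.toList.length := Nat.lt_of_lt_of_le hc hslen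
  have hch : (PySem.Str.pyGet? ((PySem.List.pyGet? grid (r : Int)).getD "") (c : Int)).getD ' ' =
      s.toList[c]'hcs := by
    rw [show PySem.Str.pyGet? = fun (t : String) i => PySem.List.pyGet? t.toList i from rfl]
    rw [PySem.List.pyGet?_natCast, hs]
    show (PySem.List.pyGet? s.toList (c : Int)).getD ' ' = _
    rw [PySem.List.pyGet?_natCast, List.getElem?_eq_getElem hcs]
    rfl
  have htake : s.toList[c]'hcs ∈ s.toList.take C := by
    have h1 : c < (s.toList.take C).length := by rw [List.length_take]; omega
    have h2 : (s.toList.take C)[c]'h1 = s.toList[c]'hcs := List.getElem_take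
    exact h2 ▸ List.getElem_mem h1
  rw [hch]
  exact hschars _ htake

theorem g_facts (grid : List String) (R C : Nat) (hR : grid.length = R)
    (hC : (grid.headD "").toList.length = C) (hPre : Pre_solution grid)
    (t : Nat) (ht : t < 4 * R * C) :
    gfun grid R C t < 4 * R * C ∧
    stepB grid (R : Int) (C : Int) (t : Int) = ((gfun grid R C t : Nat) : Int) ∧
    PySem.List.pyGetD (buildNxt grid (R : Int) (C : Int)) ((t : Nat) : Int) 0 =
      ((gfun grid R C t : Nat) : Int) := by
  obtain ⟨hr, hc, hd, henc⟩ := state_decomp R C t ht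
  obtain ⟨r', c', d', hr', hc', hd', _, hB⟩ :=
    step_spec grid R C hR hC hPre _ _ _ hr hc hd
  have hg : gfun grid R C t = enc C r' c' d' := by
    unfold gfun; rw [hB, Int.toNat_natCast]
  refine ⟨by rw [hg]; exact enc_lt R C r' c' d' hr' hc' hd', ?_, ?_⟩
  · have e4 : (4 : Int) = ((4 : Nat) : Int) := by norm_num
    have hstep : stepB grid (R : Int) (C : Int) (t : Int) =
        nxtF grid (R : Int) (C : Int)
          (PySem.Int.floordiv (PySem.Int.floordiv (t : Int) 4) (C : Int))
          (PySem.Int.mod (PySem.Int.floordiv (t : Int) 4) (C : Int))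
          (PySem.Int.mod (t : Int) 4) := rfl
    rw [hstep, e4, PySem.Int.mod_natCast, PySem.Int.floordiv_natCast,
      PySem.Int.floordiv_natCast, PySem.Int.mod_natCast, hB, hg]
  · rw [PySem.List.pyGetD_natCast]
    show (buildNxt grid (R : Int) (C : Int)).getD t 0 = ((gfun grid R C t : Nat) : Int)
    conv_lhs => rw [← henc]
    rw [nxt_getD grid R C _ _ _ hr hc hd, hB, hg]

-- the turn tables: each entry is a direction < 4, and each table is injective
theorem turn_spec (ch : Char) (hch : ch = 'S' ∨ ch = 'L' ∨ ch = 'R') (d : Nat) (hd : d < 4) :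
    ∃ nd : Nat, nd < 4 ∧
      PySem.List.pyGetD (PySem.Dict.getD turnB ch []) ((d : Nat) : Int) 0 = ((nd : Nat) : Int) := by
  rcases hch with h | h | h <;> subst h <;> interval_cases d
  exacts [⟨0, by omega, by decide⟩, ⟨1, by omega, by decide⟩, ⟨2, by omega, by decide⟩,
    ⟨3, by omega, by decide⟩, ⟨2, by omega, by decide⟩, ⟨3, by omega, by decide⟩,
    ⟨1, by omega, by decide⟩, ⟨0, by omega, by decide⟩, ⟨3, by omega, by decide⟩,
    ⟨2, by omega, by decide⟩, ⟨0, by omega, by decide⟩, ⟨1, by omega, by decide⟩]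

theorem turn_inj (ch : Char) (hch : ch = 'S' ∨ ch = 'L' ∨ ch = 'R') (d1 d2 : Nat)
    (h1 : d1 < 4) (h2 : d2 < 4)
    (h : PySem.List.pyGetD (PySem.Dict.getD turnB ch []) ((d1 : Nat) : Int) 0 =
         PySem.List.pyGetD (PySem.Dict.getD turnB ch []) ((d2 : Nat) : Int) 0) : d1 = d2 := by
  rcases hch with hc | hc | hc <;> subst hc <;> interval_cases d1 <;> interval_cases d2 <;>
    first | rfl | (exact absurd h (by decide))

-- euclidean division uniqueness over Int
theorem int_div_unique (Cc a b a' b' : Int) (hC : 0 < Cc) (hb : 0 ≤ b) (hb2 : b < Cc)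
    (hb' : 0 ≤ b') (hb2' : b' < Cc) (h : a * Cc + b = a' * Cc + b') : a = a' ∧ b = b' := by
  have hd : b' - b = (a - a') * Cc := by linarith
  have hdvd : Cc ∣ (b' - b) := ⟨a - a', by linarith [hd]⟩
  have hz : b' - b = 0 := Int.eq_zero_of_abs_lt_dvd hdvd (abs_lt.mpr ⟨by omega, by omega⟩)
  have hz2 : (a - a') * Cc = 0 := by omega
  have := mul_eq_zero.mp hz2
  constructor
  · rcases this with h' | h'
    · omega
    · omega
  · omega

-- wraparound positions determine the original position
theorem wrap_cancel (M t a b : Int) (hM : 0 < M) (ha0 : 0 ≤ a) (ha : a < M)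
    (hb0 : 0 ≤ b) (hb : b < M)
    (h : PySem.Int.mod (a + t) M = PySem.Int.mod (b + t) M) : a = b := by
  rw [PySem.Int.mod_eq_emod_of_pos hM, PySem.Int.mod_eq_emod_of_pos hM] at h
  have hsub : (a - b) % M = 0 := by
    have : ((a + t) - (b + t)) % M = ((a + t) % M - (b + t) % M) % M := Int.sub_emod _ _ _
    rw [h, sub_self, Int.zero_emod] at this
    rw [show a - b = (a + t) - (b + t) by ring, this]
  have hdvd : M ∣ (a - b) := Int.dvd_of_emod_eq_zero hsub
  have := Int.eq_zero_of_abs_lt_dvd hdvd (abs_lt.mpr ⟨by omega, by omega⟩)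
  omega

-- B's step formula is injective on in-range states
set_option maxHeartbeats 1000000 in
theorem nxtF_inj (grid : List String) (R C : Nat) (hR : grid.length = R)
    (hC : (grid.headD "").toList.length = C) (hPre : Pre_solution grid)
    (r1 c1 d1 r2 c2 d2 : Nat) (hr1 : r1 < R) (hc1 : c1 < C) (hd1 : d1 < 4)
    (hr2 : r2 < R) (hc2 : c2 < C) (hd2 : d2 < 4)
    (h : nxtF grid (R : Int) (C : Int) (r1 : Int) (c1 : Int) (d1 : Int) =
         nxtF grid (R : Int) (C : Int) (r2 : Int) (c2 : Int) (d2 : Int)) :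
    r1 = r2 ∧ c1 = c2 ∧ d1 = d2 := by
  have hRp : (0 : Int) < (R : Int) := by exact_mod_cast (show 0 < R by omega)
  have hCp : (0 : Int) < (C : Int) := by exact_mod_cast (show 0 < C by omega)
  have hch1 := char_SLR grid R C hR hC hPre r1 c1 hr1 hc1
  have hch2 := char_SLR grid R C hR hC hPre r2 c2 hr2 hc2
  obtain ⟨nd1, hnd1, he1⟩ := turn_spec _ hch1 d1 hd1
  obtain ⟨nd2, hnd2, he2⟩ := turn_spec _ hch2 d2 hd2
  simp only [nxtF, he1, he2] at h
  set dd1 := PySem.List.pyGetD deltaB ((nd1 : Nat) : Int) (0, 0) with hdd1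
  set dd2 := PySem.List.pyGetD deltaB ((nd2 : Nat) : Int) (0, 0) with hdd2
  have hm1a := PySem.Int.mod_nonneg ((r1 : Int) + dd1.1) hRp
  have hm1b := PySem.Int.mod_lt ((r1 : Int) + dd1.1) hRp
  have hm2a := PySem.Int.mod_nonneg ((c1 : Int) + dd1.2) hCp
  have hm2b := PySem.Int.mod_lt ((c1 : Int) + dd1.2) hCp
  have hm3a := PySem.Int.mod_nonneg ((r2 : Int) + dd2.1) hRp
  have hm3b := PySem.Int.mod_lt ((r2 : Int) + dd2.1) hRp
  have hm4a := PySem.Int.mod_nonneg ((c2 : Int) + dd2.2) hCp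
  have hm4b := PySem.Int.mod_lt ((c2 : Int) + dd2.2) hCp
  have hnd : nd1 = nd2 ∧
      PySem.Int.mod ((r1 : Int) + dd1.1) (R : Int) * (C : Int) +
        PySem.Int.mod ((c1 : Int) + dd1.2) (C : Int) =
      PySem.Int.mod ((r2 : Int) + dd2.1) (R : Int) * (C : Int) +
        PySem.Int.mod ((c2 : Int) + dd2.2) (C : Int) := by
    constructor
    · omega
    · omega
  obtain ⟨hndeq, hX⟩ := hnd
  subst hndeq
  have hdd : dd1 = dd2 := by rw [hdd1, hdd2]
  rw [← hdd] at hX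
  obtain ⟨hrow, hcol⟩ := int_div_unique (C : Int) _ _ _ _ hCp hm2a hm2b hm4a hm4b hX
  have hr12 : r1 = r2 := by
    have := wrap_cancel (R : Int) dd1.1 (r1 : Int) (r2 : Int) hRp (by positivity)
      (by exact_mod_cast hr1) (by positivity) (by exact_mod_cast hr2) hrow
    exact_mod_cast this
  have hc12 : c1 = c2 := by
    have := wrap_cancel (C : Int) dd1.2 (c1 : Int) (c2 : Int) hCp (by positivity)
      (by exact_mod_cast hc1) (by positivity) (by exact_mod_cast hc2) hcol
    exact_mod_cast this
  subst hr12; subst hc12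
  refine ⟨rfl, rfl, ?_⟩
  exact turn_inj _ hch1 d1 d2 hd1 hd2 (he1.trans (by rw [he2]))

theorem g_inj (grid : List String) (R C : Nat) (hR : grid.length = R)
    (hC : (grid.headD "").toList.length = C) (hPre : Pre_solution grid)
    (a b : Nat) (ha : a < 4 * R * C) (hb : b < 4 * R * C)
    (h : gfun grid R C a = gfun grid R C b) : a = b := by
  obtain ⟨hra, hca, hda, henca⟩ := state_decomp R C a ha
  obtain ⟨hrb, hcb, hdb, hencb⟩ := state_decomp R C b hb
  obtain ⟨r1', c1', d1', _, _, _, _, hBa⟩ := step_spec grid R C hR hC hPre _ _ _ hra hca hda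
  obtain ⟨r2', c2', d2', _, _, _, _, hBb⟩ := step_spec grid R C hR hC hPre _ _ _ hrb hcb hdb
  have hna : nxtF grid (R : Int) (C : Int) ((a / 4 / C : Nat) : Int) ((a / 4 % C : Nat) : Int)
      ((a % 4 : Nat) : Int) = nxtF grid (R : Int) (C : Int) ((b / 4 / C : Nat) : Int)
      ((b / 4 % C : Nat) : Int) ((b % 4 : Nat) : Int) := by
    rw [hBa, hBb]
    unfold gfun at h
    rw [hBa, Int.toNat_natCast, hBb, Int.toNat_natCast] at h
    exact_mod_cast h
  obtain ⟨e1, e2, e3⟩ := nxtF_inj grid R C hR hC hPre _ _ _ _ _ _ hra hca hda hrb hcb hdb hna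
  rw [← henca, ← hencb, e1, e2, e3]

-- iterates stay on the state space
theorem iter_lt (grid : List String) (R C : Nat) (hR : grid.length = R)
    (hC : (grid.headD "").toList.length = C) (hPre : Pre_solution grid) :
    ∀ (k t : Nat), t < 4 * R * C → (gfun grid R C)^[k] t < 4 * R * C := by
  intro k
  induction k with
  | zero => intro t ht; simpa using ht
  | succ k ih =>
    intro t ht
    rw [Function.iterate_succ_apply']
    exact (g_facts grid R C hR hC hPre _ (ih t ht)).1

theorem iter_inj (grid : List String) (R C : Nat) (hR : grid.length = R)
    (hC : (grid.headD "").toList.length = C) (hPre : Pre_solution grid) :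
    ∀ (k a b : Nat), a < 4 * R * C → b < 4 * R * C →
      (gfun grid R C)^[k] a = (gfun grid R C)^[k] b → a = b := by
  intro k
  induction k with
  | zero => intro a b _ _ h; simpa using h
  | succ k ih =>
    intro a b ha hb h
    rw [Function.iterate_succ_apply', Function.iterate_succ_apply'] at h
    exact ih a b ha hb (g_inj grid R C hR hC hPre _ _
      (iter_lt grid R C hR hC hPre k a ha) (iter_lt grid R C hR hC hPre k b hb) h)

-- every state lies on a cycle (the step map is injective on a finite set)
theorem exists_return (grid : List String) (R C : Nat) (hR : grid.length = R)
    (hC : (grid.headD "").toList.length = C) (hPre : Pre_solution grid)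
    (t : Nat) (ht : t < 4 * R * C) :
    ∃ m, 0 < m ∧ m ≤ 4 * R * C ∧ (gfun grid R C)^[m] t = t := by
  obtain ⟨i, hi, j, hj, hne, heq⟩ :=
    Finset.exists_ne_map_eq_of_card_lt_of_maps_to
      (s := Finset.range (4 * R * C + 1)) (t := Finset.range (4 * R * C))
      (by simp) (fun k _ => Finset.mem_range.mpr (iter_lt grid R C hR hC hPre k t ht))
  rw [Finset.mem_range] at hi hj
  -- wlog i < j
  rcases Nat.lt_or_ge i j with hlt | hge
  · refine ⟨j - i, by omega, by omega, ?_⟩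
    have : (gfun grid R C)^[i] t = (gfun grid R C)^[i] ((gfun grid R C)^[j - i] t) := by
      rw [← Function.iterate_add_apply, show i + (j - i) = j by omega, heq]
    exact (iter_inj grid R C hR hC hPre i t _ ht
      (iter_lt grid R C hR hC hPre _ t ht) this).symm
  · have hlt : j < i := by omega
    refine ⟨i - j, by omega, by omega, ?_⟩
    have : (gfun grid R C)^[j] t = (gfun grid R C)^[j] ((gfun grid R C)^[i - j] t) := by
      rw [← Function.iterate_add_apply, show j + (i - j) = i by omega, heq]
    exact (iter_inj grid R C hR hC hPre j t _ ht
      (iter_lt grid R C hR hC hPre _ t ht) this).symm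

theorem state_periodic (grid : List String) (R C : Nat) (hR : grid.length = R)
    (hC : (grid.headD "").toList.length = C) (hPre : Pre_solution grid)
    (t : Nat) (ht : t < 4 * R * C) : t ∈ Function.periodicPts (gfun grid R C) := by
  obtain ⟨m, hm, _, hret⟩ := exists_return grid R C hR hC hPre t ht
  exact Function.mk_mem_periodicPts hm hret

theorem period_le (grid : List String) (R C : Nat) (hR : grid.length = R)
    (hC : (grid.headD "").toList.length = C) (hPre : Pre_solution grid)
    (t : Nat) (ht : t < 4 * R * C) :
    Function.minimalPeriod (gfun grid R C) t ≤ 4 * R * C := by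
  obtain ⟨m, hm, hmle, hret⟩ := exists_return grid R C hR hC hPre t ht
  exact le_trans (Function.IsPeriodicPt.minimalPeriod_le hm hret) hmle

-- reachability is symmetric on periodic points
theorem orbit_symm (g : Nat → Nat) (t : Nat) (hper : t ∈ Function.periodicPts g)
    (i : Nat) : ∃ k, g^[k] (g^[i] t) = t := by
  have hP : 0 < Function.minimalPeriod g t := Function.minimalPeriod_pos_of_mem_periodicPts hper
  set P := Function.minimalPeriod g t with hPdef
  refine ⟨P * (i + 1) - i, ?_⟩
  rw [← Function.iterate_add_apply, show P * (i + 1) - i + i = P * (i + 1) by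
    have : i + 1 ≤ P * (i + 1) := Nat.le_mul_of_pos_left _ hP
    omega]
  have : Function.IsPeriodicPt g (P * (i + 1)) t :=
    (Function.isPeriodicPt_minimalPeriod g t).mul_const (i + 1)
  exact this

-- any reachability witness can be bounded by the minimal period
theorem orbit_bounded (g : Nat → Nat) (s t : Nat) (hper : s ∈ Function.periodicPts g) :
    (∃ i, g^[i] s = t) ↔ (∃ i < Function.minimalPeriod g s, g^[i] s = t) := by
  have hP : 0 < Function.minimalPeriod g s := Function.minimalPeriod_pos_of_mem_periodicPts hper
  constructor
  · rintro ⟨i, hi⟩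
    exact ⟨i % Function.minimalPeriod g s, Nat.mod_lt _ hP,
      by rw [Function.iterate_mod_minimalPeriod_eq, hi]⟩
  · rintro ⟨i, _, hi⟩; exact ⟨i, hi⟩

theorem pyGetD_vis (vis : List Bool) (t : Nat) (ht : t < vis.length) :
    PySem.List.pyGetD vis ((t : Nat) : Int) true = vis.getD t false := by
  rw [PySem.List.pyGetD_natCast, List.getD_eq_getElem?_getD, List.getD_eq_getElem?_getD,
    List.getElem?_eq_getElem ht]
  rfl

-- the marking walk from a cycle-minimal state traverses exactly its cycle
theorem walkF_run (grid : List String) (R C : Nat) (hR : grid.length = R)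
    (hC : (grid.headD "").toList.length = C) (hPre : Pre_solution grid)
    (s : Nat) (hs : s < 4 * R * C)
    (hmin : ∀ i, s ≤ (gfun grid R C)^[i] s) :
    ∀ (f j : Nat) (vis : List Bool),
      j ≤ Function.minimalPeriod (gfun grid R C) s →
      Function.minimalPeriod (gfun grid R C) s - j ≤ f →
      vis.length = 4 * R * C →
      (∀ t, t < 4 * R * C → (vis.getD t false = true ↔
        ((∃ i, (gfun grid R C)^[i] t < s) ∨ ∃ i < j, (gfun grid R C)^[i] s = t))) →
      ∃ vis',
        walkF (buildNxt grid (R : Int) (C : Int)) f vis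
            ((((gfun grid R C)^[j] s : Nat)) : Int) ((j : Nat) : Int) =
          (vis', ((Function.minimalPeriod (gfun grid R C) s : Nat) : Int)) ∧
        vis'.length = 4 * R * C ∧
        (∀ t, t < 4 * R * C → (vis'.getD t false = true ↔
          ((∃ i, (gfun grid R C)^[i] t < s) ∨ ∃ i, (gfun grid R C)^[i] s = t))) := by
  have hper := state_periodic grid R C hR hC hPre s hs
  have hPpos : 0 < Function.minimalPeriod (gfun grid R C) s :=
    Function.minimalPeriod_pos_of_mem_periodicPts hper
  have hretP : (gfun grid R C)^[Function.minimalPeriod (gfun grid R C) s] s = s :=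
    Function.iterate_minimalPeriod
  intro f
  induction f with
  | zero =>
    intro j vis hj hf hlen hchar
    have hjP : j = Function.minimalPeriod (gfun grid R C) s := by omega
    subst hjP
    refine ⟨vis, rfl, hlen, ?_⟩
    intro t ht
    rw [hchar t ht]
    constructor
    · rintro (h | ⟨i, _, hi⟩)
      exacts [Or.inl h, Or.inr ⟨i, hi⟩]
    · rintro (h | hi)
      · exact Or.inl h
      · exact Or.inr ((orbit_bounded (gfun grid R C) s t hper).mp hi)
  | succ f ih =>
    intro j vis hj hf hlen hchar
    by_cases hjP : j = Function.minimalPeriod (gfun grid R C) s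
    · subst hjP
      simp only [walkF]
      rw [hretP, pyGetD_vis vis s (by omega)]
      have hmarked : vis.getD s false = true :=
        (hchar s hs).mpr (Or.inr ⟨0, hPpos, rfl⟩)
      rw [hmarked, if_neg (by simp)]
      refine ⟨vis, rfl, hlen, ?_⟩
      intro t ht
      rw [hchar t ht]
      constructor
      · rintro (h | ⟨i, _, hi⟩)
        exacts [Or.inl h, Or.inr ⟨i, hi⟩]
      · rintro (h | hi)
        · exact Or.inl h
        · exact Or.inr ((orbit_bounded (gfun grid R C) s t hper).mp hi)
    · have hjlt : j < Function.minimalPeriod (gfun grid R C) s := by omega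
      have hcurlt : (gfun grid R C)^[j] s < 4 * R * C :=
        iter_lt grid R C hR hC hPre j s hs
      have hunm : vis.getD ((gfun grid R C)^[j] s) false = false := by
        cases h : vis.getD ((gfun grid R C)^[j] s) false with
        | false => rfl
        | true =>
          exfalso
          rcases (hchar _ hcurlt).mp h with ⟨i, hi⟩ | ⟨i, hij, hi⟩
          · rw [← Function.iterate_add_apply] at hi
            exact absurd hi (by have := hmin (i + j); omega)
          · exact absurd (Function.iterate_injOn_Iio_minimalPeriod
              (Set.mem_Iio.mpr (by omega)) (Set.mem_Iio.mpr hjlt) hi) (by omega)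
      simp only [walkF]
      rw [pyGetD_vis vis _ (by omega), hunm, if_pos rfl, PySem.List.pySetD_natCast,
        (g_facts grid R C hR hC hPre _ hcurlt).2.2,
        show (gfun grid R C) ((gfun grid R C)^[j] s) = (gfun grid R C)^[j + 1] s from
          (Function.iterate_succ_apply' _ _ _).symm,
        show ((j : Nat) : Int) + 1 = (((j + 1 : Nat)) : Int) by push_cast; ring]
      refine ih (j + 1) (vis.set ((gfun grid R C)^[j] s) true) (by omega) (by omega)
        (by rw [List.length_set]; exact hlen) ?_
      intro t ht
      rw [getD_set_nat vis _ t true false (by omega)]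
      by_cases hteq : t = (gfun grid R C)^[j] s
      · subst hteq
        rw [if_pos rfl]
        simp only [true_iff]
        exact Or.inr ⟨j, by omega, rfl⟩
      · rw [if_neg hteq, hchar t ht]
        constructor
        · rintro (h | ⟨i, hij, hi⟩)
          exacts [Or.inl h, Or.inr ⟨i, by omega, hi⟩]
        · rintro (h | ⟨i, hij, hi⟩)
          · exact Or.inl h
          · refine Or.inr ⟨i, ?_, hi⟩
            rcases Nat.lt_or_ge i j with h' | h'
            · exact h'
            · exfalso
              have hij2 : i = j := by omega
              subst hij2
              exact hteq hi.symm
        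
-- B's walk computes the cycle length and whether the start is the cycle minimum
theorem walkB_run (grid : List String) (R C : Nat) (hR : grid.length = R)
    (hC : (grid.headD "").toList.length = C) (hPre : Pre_solution grid)
    (s : Nat) (hs : s < 4 * R * C) :
    ∀ (f j : Nat) (small : Bool), 1 ≤ j →
      j ≤ Function.minimalPeriod (gfun grid R C) s →
      Function.minimalPeriod (gfun grid R C) s - j ≤ f →
      walkB grid (R : Int) (C : Int) f ((s : Nat) : Int)
          ((((gfun grid R C)^[j] s : Nat)) : Int) ((j : Nat) : Int) small =
        (((Function.minimalPeriod (gfun grid R C) s : Nat) : Int),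
          small && decide (∀ i < Function.minimalPeriod (gfun grid R C) s,
            j ≤ i → s ≤ (gfun grid R C)^[i] s)) := by
  have hper := state_periodic grid R C hR hC hPre s hs
  have hPpos : 0 < Function.minimalPeriod (gfun grid R C) s :=
    Function.minimalPeriod_pos_of_mem_periodicPts hper
  have hretP : (gfun grid R C)^[Function.minimalPeriod (gfun grid R C) s] s = s :=
    Function.iterate_minimalPeriod
  intro f
  induction f with
  | zero =>
    intro j small h1 hj hf
    have hjP : j = Function.minimalPeriod (gfun grid R C) s := by omega
    subst hjP
    have hvac : decide (∀ i < Function.minimalPeriod (gfun grid R C) s,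
        Function.minimalPeriod (gfun grid R C) s ≤ i → s ≤ (gfun grid R C)^[i] s) = true := by
      rw [decide_eq_true_eq]; intro i hi hPi; omega
    simp only [walkB, hvac, Bool.and_true]
  | succ f ih =>
    intro j small h1 hj hf
    by_cases hjP : j = Function.minimalPeriod (gfun grid R C) s
    · subst hjP
      have hvac : decide (∀ i < Function.minimalPeriod (gfun grid R C) s,
          Function.minimalPeriod (gfun grid R C) s ≤ i → s ≤ (gfun grid R C)^[i] s) = true := by
        rw [decide_eq_true_eq]; intro i hi hPi; omega
      rw [show ((((gfun grid R C)^[Function.minimalPeriod (gfun grid R C) s] s : Nat)) : Int) =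
          ((s : Nat) : Int) by rw [hretP]]
      simp only [walkB]
      rw [if_neg (by simp), hvac, Bool.and_true]
    · have hjlt : j < Function.minimalPeriod (gfun grid R C) s := by omega
      have hcurlt : (gfun grid R C)^[j] s < 4 * R * C :=
        iter_lt grid R C hR hC hPre j s hs
      have hne : (gfun grid R C)^[j] s ≠ s := by
        intro h
        have h0 : (gfun grid R C)^[j] s = (gfun grid R C)^[0] s := by simpa using h
        have := Function.iterate_injOn_Iio_minimalPeriod
          (Set.mem_Iio.mpr hjlt) (Set.mem_Iio.mpr hPpos) h0
        omega
      have hnei : ((((gfun grid R C)^[j] s : Nat)) : Int) ≠ ((s : Nat) : Int) := by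
        exact_mod_cast hne
      simp only [walkB, if_pos hnei]
      rw [(g_facts grid R C hR hC hPre _ hcurlt).2.1,
        show (gfun grid R C) ((gfun grid R C)^[j] s) = (gfun grid R C)^[j + 1] s from
          (Function.iterate_succ_apply' _ _ _).symm,
        show ((j : Nat) : Int) + 1 = (((j + 1 : Nat)) : Int) by push_cast; ring,
        ih (j + 1) _ (by omega) (by omega) (by omega)]
      by_cases hlt : (gfun grid R C)^[j] s < s
      · have hc1 : ((((gfun grid R C)^[j] s : Nat)) : Int) < ((s : Nat) : Int) := by
          exact_mod_cast hlt
        have hDj : decide (∀ i < Function.minimalPeriod (gfun grid R C) s,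
            j ≤ i → s ≤ (gfun grid R C)^[i] s) = false := by
          rw [decide_eq_false_iff_not]
          push_neg
          exact ⟨j, hjlt, le_refl j, by omega⟩
        rw [if_pos hc1, hDj, Bool.false_and, Bool.and_false]
      · have hc1 : ¬ ((((gfun grid R C)^[j] s : Nat)) : Int) < ((s : Nat) : Int) := by
          exact_mod_cast hlt
        rw [if_neg hc1]
        congr 1
        congr 1
        rw [decide_eq_decide]
        constructor
        · intro h i hi hji
          rcases Nat.eq_or_lt_of_le hji with he | hl
          · subst he; omega
          · exact h i hi hl
        · intro h i hi hji
          exact h i hi (by omega)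

-- the two scans over all states produce the same answer list
theorem fold_eq (grid : List String) (R C : Nat) (hR : grid.length = R)
    (hC : (grid.headD "").toList.length = C) (hPre : Pre_solution grid) :
    ∀ (k s0 : Nat) (vis : List Bool) (ans : List Int),
      s0 + k = 4 * R * C →
      vis.length = 4 * R * C →
      (∀ t, t < 4 * R * C → (vis.getD t false = true ↔ ∃ i, (gfun grid R C)^[i] t < s0)) →
      ((List.range' s0 k).foldl (fun st (u : Nat) =>
          if PySem.List.pyGetD st.1 ((u : Nat) : Int) true = false then
            ((walkF (buildNxt grid (R : Int) (C : Int)) (4 * R * C + 1) st.1 ((u : Nat) : Int) 0).1,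
             st.2 ++ [(walkF (buildNxt grid (R : Int) (C : Int)) (4 * R * C + 1) st.1 ((u : Nat) : Int) 0).2])
          else st) (vis, ans)).2 =
      (List.range' s0 k).foldl (fun ansl (u : Nat) =>
          if (walkB grid (R : Int) (C : Int) (4 * R * C) ((u : Nat) : Int)
                (stepB grid (R : Int) (C : Int) ((u : Nat) : Int)) 1 true).2 then
            ansl ++ [(walkB grid (R : Int) (C : Int) (4 * R * C) ((u : Nat) : Int)
                (stepB grid (R : Int) (C : Int) ((u : Nat) : Int)) 1 true).1]
          else ansl) ans := by
  intro k
  induction k with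
  | zero => intro s0 vis ans _ _ _; rfl
  | succ k ih =>
    intro s0 vis ans hk hlen hchar
    have hs0 : s0 < 4 * R * C := by omega
    have hper := state_periodic grid R C hR hC hPre s0 hs0
    have hPpos : 0 < Function.minimalPeriod (gfun grid R C) s0 :=
      Function.minimalPeriod_pos_of_mem_periodicPts hper
    have hPle : Function.minimalPeriod (gfun grid R C) s0 ≤ 4 * R * C :=
      period_le grid R C hR hC hPre s0 hs0
    have hstep1 : stepB grid (R : Int) (C : Int) ((s0 : Nat) : Int) =
        ((((gfun grid R C)^[1] s0 : Nat)) : Int) := by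
      rw [(g_facts grid R C hR hC hPre s0 hs0).2.1]
      norm_num
    rw [List.range'_succ, List.foldl_cons, List.foldl_cons]
    by_cases hmin : ∀ i, s0 ≤ (gfun grid R C)^[i] s0
    · -- s0 is the minimum of its cycle: both sides append the cycle length
      have hunm : vis.getD s0 false = false := by
        cases h : vis.getD s0 false with
        | false => rfl
        | true =>
          exfalso
          obtain ⟨i, hi⟩ := (hchar s0 hs0).mp h
          exact absurd hi (by have := hmin i; omega)
      obtain ⟨vis', hw, hlen', hchar'⟩ := walkF_run grid R C hR hC hPre s0 hs0 hmin
        (4 * R * C + 1) 0 vis (by omega) (by omega) hlen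
        (by
          intro t ht
          rw [hchar t ht]
          simp)
      rw [Function.iterate_zero_apply, Nat.cast_zero] at hw
      have hwB := walkB_run grid R C hR hC hPre s0 hs0 (4 * R * C) 1 true (le_refl 1)
        hPpos (by omega)
      have hD1 : decide (∀ i < Function.minimalPeriod (gfun grid R C) s0,
          1 ≤ i → s0 ≤ (gfun grid R C)^[i] s0) = true := by
        rw [decide_eq_true_eq]
        intro i _ _
        exact hmin i
      rw [hD1, Bool.true_and, Nat.cast_one] at hwB
      rw [pyGetD_vis vis s0 (by omega), hunm, if_pos rfl, hw, hstep1, hwB]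
      simp only []
      rw [if_pos trivial]
      refine ih (s0 + 1) vis' (ans ++ [((Function.minimalPeriod (gfun grid R C) s0 : Nat) : Int)])
        (by omega) hlen' ?_
      intro t ht
      rw [hchar' t ht]
      constructor
      · rintro (⟨i, hi⟩ | ⟨i, hi⟩)
        · exact ⟨i, by omega⟩
        · obtain ⟨kk, hkk⟩ := orbit_symm (gfun grid R C) s0 hper i
          rw [hi] at hkk
          exact ⟨kk, by omega⟩
      · rintro ⟨i, hi⟩
        rcases Nat.lt_or_ge ((gfun grid R C)^[i] t) s0 with h' | h'
        · exact Or.inl ⟨i, h'⟩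
        · have heq : (gfun grid R C)^[i] t = s0 := by omega
          have hpert := state_periodic grid R C hR hC hPre t ht
          obtain ⟨kk, hkk⟩ := orbit_symm (gfun grid R C) t hpert i
          rw [heq] at hkk
          exact Or.inr ⟨kk, hkk⟩
    · -- s0 is not its cycle minimum: both sides skip
      push_neg at hmin
      obtain ⟨i0, hi0⟩ := hmin
      have hmark : vis.getD s0 false = true := (hchar s0 hs0).mpr ⟨i0, hi0⟩
      have hwB := walkB_run grid R C hR hC hPre s0 hs0 (4 * R * C) 1 true (le_refl 1)
        hPpos (by omega)
      have hD1 : decide (∀ i < Function.minimalPeriod (gfun grid R C) s0,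
          1 ≤ i → s0 ≤ (gfun grid R C)^[i] s0) = false := by
        rw [decide_eq_false_iff_not]
        push_neg
        have hj0ne : i0 % Function.minimalPeriod (gfun grid R C) s0 ≠ 0 := by
          intro h
          have := Function.iterate_mod_minimalPeriod_eq
            (f := gfun grid R C) (x := s0) (n := i0)
          rw [h] at this
          simp only [Function.iterate_zero_apply] at this
          omega
        refine ⟨i0 % Function.minimalPeriod (gfun grid R C) s0, Nat.mod_lt _ hPpos,
          by omega, ?_⟩
        have := Function.iterate_mod_minimalPeriod_eq
          (f := gfun grid R C) (x := s0) (n := i0)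
        omega
      rw [hD1, Bool.true_and, Nat.cast_one] at hwB
      rw [pyGetD_vis vis s0 (by omega), hmark, if_neg (by simp), hstep1, hwB]
      simp only []
      rw [if_neg (by simp)]
      refine ih (s0 + 1) vis ans (by omega) hlen ?_
      intro t ht
      rw [hchar t ht]
      constructor
      · rintro ⟨i, hi⟩
        exact ⟨i, by omega⟩
      · rintro ⟨i, hi⟩
        rcases Nat.lt_or_ge ((gfun grid R C)^[i] t) s0 with h' | h'
        · exact ⟨i, h'⟩
        · have heq : (gfun grid R C)^[i] t = s0 := by omega
          refine ⟨i0 + i, ?_⟩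
          rw [Function.iterate_add_apply, heq]
          exact hi0

-- the flat marking algorithm equals B
theorem main2 (grid : List String) (hPre : Pre_solution grid) :
    flatA grid = solution_alt grid := by
  by_cases hnil : grid = []
  · rw [hnil]; rfl
  · obtain ⟨g0, gs, hg⟩ := List.exists_cons_of_ne_nil hnil
    subst hg
    obtain ⟨Rn, hR⟩ : ∃ n, (g0 :: gs).length = n := ⟨_, rfl⟩
    obtain ⟨Cn, hC⟩ : ∃ n, ((g0 :: gs).headD "").toList.length = n := ⟨_, rfl⟩
    have hRlen : PySem.List.len (g0 :: gs) = (Rn : Int) := by rw [PySem.List.len_eq, hR]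
    have hClenB : PySem.Str.len g0 = (Cn : Int) := by
      rw [PySem.Str.len_eq]
      simp only [List.headD_cons] at hC
      rw [hC]
    unfold flatA solution_alt
    simp only [hRlen, hClenB]
    rw [show ((4 : Int) * (Rn : Int) * (Cn : Int)).toNat = 4 * Rn * Cn by
        rw [show ((4 : Int) * (Rn : Int) * (Cn : Int)) = ((4 * Rn * Cn : Nat) : Int) by
          push_cast; ring, Int.toNat_natCast],
      show ((4 : Int) * (Rn : Int) * (Cn : Int)) = ((4 * Rn * Cn : Nat) : Int) by
        push_cast; ring]
    rw [PySem.List.pyRange_zero_nat, List.foldl_map, List.foldl_map, List.range_eq_range']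
    exact congrArg (fun l => PySem.List.sorted l id false)
      (fold_eq (g0 :: gs) Rn Cn hR hC hPre (4 * Rn * Cn) 0
        (List.replicate (4 * Rn * Cn) false) [] (by omega) (by simp) (by
          intro t ht
          rw [List.getD_replicate _ (by omega)]
          simp))

-- ===== VERDICT (by name: the statement is the Claim_ definition above) =====
theorem solution_spec : Claim_equal_solution := by
  unfold Claim_equal_solution Spec_solution
  intro grid _hDom hPre
  exact (main_eq grid hPre).trans (main2 grid hPre)
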